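-- pv_equiv track=rewrite | github.com/jonasrenault/advent2020 | advent2020/day19.py | match_loop
-- ===== SOURCE A (Python) =====
-- def match_loop(psize: int, p31: list[str], p42: list[str], message: str) -> bool:
--     """
--     rule 0: 8 11
--     rule 8: 42 | 42 8
--     rule 11: 42 31 | 42 11 31
--     This means a message matching rule 0 must match a pattern from 42 at least 2 times,
--     and finish by a pattern from 31 at least one times, with the added constraint that
--     there are more patterns from 42 than from 31
--     This function return True if the message matches this rule
--
--     Args:
--         psize (int): the size of the patterns
--         p31 (list[str]): the patterns for rule 31
--         p42 (list[str]): the patterns for rule 42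
--         message (str): the message
--
--     Returns:
--         bool: True if message matches rule 0
--     """
--     if len(message) % psize != 0:
--         return False
--
--     seen42 = 0
--     seen31 = 0
--     for i in range(0, len(message), psize):
--         chunk = message[i : i + psize]
--         if seen42 < 2:
--             # start must be a 42 pattern
--             if chunk not in p42:
--                 return False
--             seen42 += 1
--         elif seen31 == 0:
--             # if we've not seen a pattern from 31 yet,
--             # match a pattern from either rule
--             if chunk in p42:
--                 seen42 += 1
--             elif chunk in p31:
--                 seen31 += 1
--             else:
--                 return False
--         else:
--             # once we've seen a 31 pattern, only match 31 patterns
--             if chunk in p31: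
--                 seen31 += 1
--             else:
--                 return False
--
--     return seen42 > 1 and seen42 > seen31 > 0
-- ===== SOURCE B (Python) =====
-- def match_loop(psize: int, p31: list[str], p42: list[str], message: str) -> bool:
--     if len(message) % psize != 0:
--         return False
--     chunks = [message[i : i + psize] for i in range(0, len(message), psize)]
--     # boundary: maximal leading run of chunks drawn from p42
--     k = 0
--     while k < len(chunks) and chunks[k] in p42:
--         k += 1
--     if not all(c in p31 for c in chunks[k:]):
--         return False
--     count42, count31 = k, len(chunks) - k
--     return count42 >= 2 and count42 > count31 > 0
-- ===== Notes on version B (the rewrite author's own statement) =====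
-- stated objective: simpler
-- what changed: Replaces A's interleaved three-state loop (seen42/seen31 counters with early returns) by an explicit decomposition: slice the message into chunks, find the boundary k of the maximal leading run of p42-chunks, check that the whole suffix lies in p31, and test the counts k >= 2 and k > len-k > 0.
import Mathlib
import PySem

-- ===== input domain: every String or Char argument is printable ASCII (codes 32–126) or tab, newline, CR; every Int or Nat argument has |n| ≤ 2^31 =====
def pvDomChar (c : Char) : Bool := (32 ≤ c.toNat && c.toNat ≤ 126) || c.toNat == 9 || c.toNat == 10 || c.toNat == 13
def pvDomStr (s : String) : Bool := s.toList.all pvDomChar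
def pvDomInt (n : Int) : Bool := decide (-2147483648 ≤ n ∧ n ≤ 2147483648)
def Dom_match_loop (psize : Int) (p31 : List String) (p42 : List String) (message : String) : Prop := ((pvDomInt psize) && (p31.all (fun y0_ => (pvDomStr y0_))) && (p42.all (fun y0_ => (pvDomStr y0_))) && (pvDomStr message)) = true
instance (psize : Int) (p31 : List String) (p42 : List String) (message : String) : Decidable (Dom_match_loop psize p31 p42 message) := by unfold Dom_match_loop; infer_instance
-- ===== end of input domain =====

-- B replaces A's interleaved three-state counting loop by an explicit decomposition
-- (boundary of the leading p42-run, then a suffix check against p31); objective: simpler.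

-- ===== PORT A =====
-- one iteration of A's for-loop; the state is none once A has early-returned False
def matchStep (p31 p42 : List String) (st : Option (Int × Int)) (chunk : String) : Option (Int × Int) :=
  match st with
  | none => none
  | some (seen42, seen31) =>
    if seen42 < 2 then
      if p42.contains chunk then some (seen42 + 1, seen31) else none
    else if seen31 == 0 then
      if p42.contains chunk then some (seen42 + 1, seen31)
      else if p31.contains chunk then some (seen42, seen31 + 1)
      else none
    else
      if p31.contains chunk then some (seen42, seen31 + 1) else none

def match_loop (psize : Int) (p31 : List String) (p42 : List String) (message : String) : Bool :=
  if PySem.Int.mod (PySem.Str.len message) psize ≠ 0 then false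
  else
    match (PySem.List.pyRange 0 (PySem.Str.len message) psize).foldl
        (fun st i => matchStep p31 p42 st (PySem.Str.slice message (some i) (some (i + psize))))
        (some ((0 : Int), (0 : Int))) with
    | none => false
    | some (seen42, seen31) => decide (seen42 > 1 ∧ seen42 > seen31 ∧ seen31 > 0)

-- ===== PORT B =====
-- Source B's while loop: length of the maximal leading run of chunks drawn from p42
def runLen42 (p42 : List String) : List String → Nat
  | [] => 0
  | c :: rest => if p42.contains c then runLen42 p42 rest + 1 else 0

def match_loop_alt (psize : Int) (p31 : List String) (p42 : List String) (message : String) : Bool :=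
  if PySem.Int.mod (PySem.Str.len message) psize ≠ 0 then false
  else
    let chunks := (PySem.List.pyRange 0 (PySem.Str.len message) psize).map
        (fun i => PySem.Str.slice message (some i) (some (i + psize)))
    let k := runLen42 p42 chunks
    if ¬ (chunks.drop k).all (fun c => p31.contains c) then false
    else decide (2 ≤ k ∧ chunks.length - k < k ∧ 0 < chunks.length - k)

-- ===== PRECONDITION & SPEC =====
-- Pre_ excludes psize = 0 only, on which Python raises ZeroDivisionError (len(message) % psize).
def Pre_match_loop (psize : Int) (p31 : List String) (p42 : List String) (message : String) : Prop := psize ≠ 0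
instance (psize : Int) (p31 : List String) (p42 : List String) (message : String) : Decidable (Pre_match_loop psize p31 p42 message) := by unfold Pre_match_loop; infer_instance
def pvWitness_match_loop : Int × List String × List String × String := (3, ["abc"], ["aaa", "bbb"], "aaabbbabc")

def Spec_match_loop (psize : Int) (p31 : List String) (p42 : List String) (message : String) (out : Bool) : Prop := out = match_loop_alt psize p31 p42 message
instance (psize : Int) (p31 : List String) (p42 : List String) (message : String) (out : Bool) : Decidable (Spec_match_loop psize p31 p42 message out) := by unfold Spec_match_loop; infer_instance

-- ===== CLAIM (what is proved, stated in full; the proofs are below) =====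
def Claim_equal_match_loop : Prop := ∀ (psize : Int) (p31 : List String) (p42 : List String) (message : String), Dom_match_loop psize p31 p42 message → Pre_match_loop psize p31 p42 message → Spec_match_loop psize p31 p42 message (match_loop psize p31 p42 message)

-- ===== LEMMAS AND PROOFS =====
def finishA (st : Option (Int × Int)) : Bool :=
  match st with
  | none => false
  | some (seen42, seen31) => decide (seen42 > 1 ∧ seen42 > seen31 ∧ seen31 > 0)

theorem matchStep_some (p31 p42 : List String) (s42 s31 : Int) (c : String) :
    matchStep p31 p42 (some (s42, s31)) c =
      if s42 < 2 then (if c ∈ p42 then some (s42 + 1, s31) else none)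
      else if s31 = 0 then
        (if c ∈ p42 then some (s42 + 1, s31) else if c ∈ p31 then some (s42, s31 + 1) else none)
      else (if c ∈ p31 then some (s42, s31 + 1) else none) := by
  simp only [matchStep, List.contains_iff_mem, beq_iff_eq]

theorem foldl_matchStep_none (p31 p42 : List String) (l : List String) :
    l.foldl (matchStep p31 p42) none = none := by
  induction l with
  | nil => rfl
  | cons c rest ih => simpa only [List.foldl_cons, matchStep] using ih

-- once a 31-chunk has been taken (seen31 >= 1, seen42 >= 2), A accepts iff the rest is all p31 and the counts work out
theorem phase3 (p31 p42 : List String) (l : List String) :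
    ∀ (s42 s31 : Int), 2 ≤ s42 → 1 ≤ s31 →
      finishA (l.foldl (matchStep p31 p42) (some (s42, s31)))
        = ((l.all fun c => p31.contains c) && decide (s31 + (l.length : Int) < s42)) := by
  induction l with
  | nil =>
    intro s42 s31 h2 h1
    simp only [List.foldl_nil, finishA, List.all_nil, Bool.true_and, List.length_nil,
      decide_eq_decide]
    push_cast
    omega
  | cons c rest ih =>
    intro s42 s31 h2 h1
    rw [List.foldl_cons, matchStep_some, if_neg (by omega : ¬ s42 < 2),
      if_neg (by omega : ¬ s31 = 0)]
    by_cases hc : c ∈ p31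
    · rw [if_pos hc, ih s42 (s31 + 1) h2 (by omega)]
      have hcb : p31.contains c = true := by simpa using hc
      rw [List.all_cons, hcb, Bool.true_and]
      congr 1
      simp only [decide_eq_decide, List.length_cons]
      push_cast
      omega
    · have hcb : p31.contains c = false := by simpa using hc
      rw [if_neg hc, foldl_matchStep_none, List.all_cons, hcb, Bool.false_and, Bool.false_and]
      rfl

-- main invariant: from state (s42, 0), A's verdict is B's boundary-then-suffix formula shifted by s42
theorem mainInv (p31 p42 : List String) (l : List String) :
    ∀ (s42 : Int), 0 ≤ s42 →
      finishA (l.foldl (matchStep p31 p42) (some (s42, 0)))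
        = (((l.drop (runLen42 p42 l)).all fun c => p31.contains c)
            && decide (2 ≤ s42 + (runLen42 p42 l : Int)
                ∧ ((l.drop (runLen42 p42 l)).length : Int) < s42 + (runLen42 p42 l : Int)
                ∧ 0 < (l.drop (runLen42 p42 l)).length)) := by
  induction l with
  | nil =>
    intro s42 _
    simp [finishA, runLen42]
  | cons c rest ih =>
    intro s42 h0
    by_cases hc : c ∈ p42
    · have hcb : p42.contains c = true := by simpa using hc
      have hstep : matchStep p31 p42 (some (s42, 0)) c = some (s42 + 1, 0) := by
        rw [matchStep_some]
        by_cases h : s42 < 2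
        · rw [if_pos h, if_pos hc]
        · rw [if_neg h, if_pos rfl, if_pos hc]
      rw [List.foldl_cons, hstep, ih (s42 + 1) (by omega)]
      simp only [runLen42, hcb, if_true, List.drop_succ_cons]
      congr 1
      simp only [decide_eq_decide]
      push_cast
      omega
    · have hcb : p42.contains c = false := by simpa using hc
      simp only [runLen42, hcb, Bool.false_eq_true, if_false, List.drop_zero]
      by_cases h2 : s42 < 2
      · have hstep : matchStep p31 p42 (some (s42, 0)) c = none := by
          rw [matchStep_some, if_pos h2, if_neg hc]
        rw [List.foldl_cons, hstep, foldl_matchStep_none]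
        have hF : ¬ (2 ≤ s42 + ((0 : Nat) : Int)
            ∧ (((c :: rest).length : Int) < s42 + ((0 : Nat) : Int))
            ∧ 0 < (c :: rest).length) := by
          push_cast
          omega
        rw [decide_eq_false hF, Bool.and_false]
        rfl
      · by_cases hc31 : c ∈ p31
        · have hc31b : p31.contains c = true := by simpa using hc31
          have hstep : matchStep p31 p42 (some (s42, 0)) c = some (s42, 1) := by
            rw [matchStep_some, if_neg h2, if_pos rfl, if_neg hc, if_pos hc31]
            norm_num
          rw [List.foldl_cons, hstep, phase3 p31 p42 rest s42 1 (by omega) (by omega),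
            List.all_cons, hc31b, Bool.true_and]
          congr 1
          simp only [decide_eq_decide, List.length_cons]
          push_cast
          omega
        · have hc31b : p31.contains c = false := by simpa using hc31
          have hstep : matchStep p31 p42 (some (s42, 0)) c = none := by
            rw [matchStep_some, if_neg h2, if_pos rfl, if_neg hc, if_neg hc31]
          rw [List.foldl_cons, hstep, foldl_matchStep_none, List.all_cons, hc31b,
            Bool.false_and, Bool.false_and]
          rfl

-- B's body over an arbitrary chunk list equals mainInv's right-hand side at s42 = 0
theorem altBody_eq (p31 p42 : List String) (l : List String) :
    (((l.drop (runLen42 p42 l)).all fun c => p31.contains c)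
        && decide (2 ≤ (0 : Int) + (runLen42 p42 l : Int)
            ∧ ((l.drop (runLen42 p42 l)).length : Int) < (0 : Int) + (runLen42 p42 l : Int)
            ∧ 0 < (l.drop (runLen42 p42 l)).length))
      = (if ¬ (l.drop (runLen42 p42 l)).all (fun c => p31.contains c) then false
         else decide (2 ≤ runLen42 p42 l ∧ l.length - runLen42 p42 l < runLen42 p42 l
            ∧ 0 < l.length - runLen42 p42 l)) := by
  by_cases hall : (l.drop (runLen42 p42 l)).all (fun c => p31.contains c) = true
  · rw [if_neg (not_not_intro hall), hall, Bool.true_and]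
    simp only [decide_eq_decide, List.length_drop]
    omega
  · have hf : (l.drop (runLen42 p42 l)).all (fun c => p31.contains c) = false := by
      simpa using hall
    rw [if_pos hall, hf, Bool.false_and]

-- ===== VERDICT (by name: the statement is the Claim_ definition above) =====
theorem match_loop_spec : Claim_equal_match_loop := by
  intro psize p31 p42 message _ _
  unfold Spec_match_loop match_loop match_loop_alt
  by_cases hg : PySem.Int.mod (PySem.Str.len message) psize ≠ 0
  · rw [if_pos hg, if_pos hg]
  · rw [if_neg hg, if_neg hg]
    show finishA ((PySem.List.pyRange 0 (PySem.Str.len message) psize).foldl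
        (fun st i => matchStep p31 p42 st (PySem.Str.slice message (some i) (some (i + psize))))
        (some ((0 : Int), (0 : Int)))) = _
    rw [← List.foldl_map (f := fun i => PySem.Str.slice message (some i) (some (i + psize)))
        (g := matchStep p31 p42), mainInv p31 p42 _ 0 le_rfl, altBody_eq]
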